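-- pv_equiv track=rewrite | github.com/zinnnn37/Coding_Test | 백준/Silver/1065. 한수/한수.py | check
-- ===== SOURCE A (Python) =====
-- def check(n):
--     if (n < 100):
--         return (n)
--     else:
--         if (n == 1000):
--             n -= 1
--         cnt = 0
--         for i in range(100, n+1):
--             cnt += sequence(i, i//10)
--         return (cnt + 99)
--
-- def sequence(n, m):
--     if (m // 10 == 0):
--         return n%10 - m
--     else:
--         res = sequence(n//10, m//10)
--     if (res == n%10-m%10):
--         return (1)
--     else:
--         return (0)
-- ===== SOURCE B (Python) =====
-- def check(n):
--     if n < 100: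
--         return n
--     if n == 1000:
--         n -= 1
--     cnt = 99
--     for i in range(100, n + 1):
--         # digits of i, least-significant first
--         d = []
--         t = i
--         while t:
--             d.append(t % 10)
--             t //= 10
--         d.reverse()  # most-significant first
--         r = d[1] - d[0]
--         prev = d[1]
--         for cur in d[2:]:
--             r = 1 if r == cur - prev else 0
--             prev = cur
--         cnt += r
--     return cnt
-- ===== Notes on version B (the rewrite author's own statement) =====
-- stated objective: alternative
-- what changed: The recursive helper sequence(n, n//10) is replaced by extracting each number's digit list once and running an iterative left-to-right chain over consecutive digit differences with a (result, previous-digit) accumulator; the two-digit base count seeds the accumulator instead of being added at the end.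
import Mathlib
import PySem

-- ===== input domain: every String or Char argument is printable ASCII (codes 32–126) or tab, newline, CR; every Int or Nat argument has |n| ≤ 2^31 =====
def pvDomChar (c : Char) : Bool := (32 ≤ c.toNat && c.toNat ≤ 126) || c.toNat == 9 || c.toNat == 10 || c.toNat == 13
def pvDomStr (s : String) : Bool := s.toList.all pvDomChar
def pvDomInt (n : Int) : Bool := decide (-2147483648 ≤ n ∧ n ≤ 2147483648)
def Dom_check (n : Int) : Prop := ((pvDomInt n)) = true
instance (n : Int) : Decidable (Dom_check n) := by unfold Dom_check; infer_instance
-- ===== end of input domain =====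

-- B replaces A's recursive two-argument digit helper by an iterative chain over the
-- digit list of each number (alternative decomposition, same asymptotic cost).


-- ===== PORT A =====
-- fuel only makes the recursion total; on every call reached from `check` the fuel suffices
def sequenceA : Nat → Int → Int → Int
  | 0, _, _ => 0
  | f+1, n, m =>
    if PySem.Int.floordiv m 10 = 0 then PySem.Int.mod n 10 - m
    else
      let res := sequenceA f (PySem.Int.floordiv n 10) (PySem.Int.floordiv m 10)
      if res = PySem.Int.mod n 10 - PySem.Int.mod m 10 then 1 else 0

def check (n : Int) : Int :=
  if n < 100 then n
  else
    let n' := if n = 1000 then n - 1 else n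
    let cnt := (PySem.List.pyRange 100 (n' + 1) 1).foldl
      (fun cnt i => cnt + sequenceA 64 i (PySem.Int.floordiv i 10)) 0
    cnt + 99

-- ===== PORT B =====
-- fuel only makes the digit-extraction loop total; 64 always suffices on the domain
def digitsRev : Nat → Int → List Int
  | 0, _ => []
  | f+1, t => if t = 0 then [] else PySem.Int.mod t 10 :: digitsRev f (PySem.Int.floordiv t 10)

def check_alt (n : Int) : Int :=
  if n < 100 then n
  else
    let n' := if n = 1000 then n - 1 else n
    (PySem.List.pyRange 100 (n' + 1) 1).foldl
      (fun cnt i =>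
        let d := (digitsRev 64 i).reverse
        let rp := (d.drop 2).foldl
          (fun (rp : Int × Int) cur => (if rp.1 = cur - rp.2 then 1 else 0, cur))
          (d.getD 1 0 - d.getD 0 0, d.getD 1 0)
        cnt + rp.1) 99

-- ===== PRECONDITION & SPEC =====
def Spec_check (n : Int) (out : Int) : Prop := out = check_alt n
instance (n : Int) (out : Int) : Decidable (Spec_check n out) := by unfold Spec_check; infer_instance

-- ===== CLAIM (what is proved, stated in full; the proofs are below) =====
def Claim_equal_check : Prop := ∀ (n : Int), Dom_check n → Spec_check n (check n)

-- ===== LEMMAS AND PROOFS =====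

-- canonical digit list (least significant first), as Ints
def Ldig (k : Nat) : List Int := (Nat.digits 10 k).map (fun a => (a : Int))

def foldF (l : List Int) (s : Int × Int) : Int × Int :=
  l.foldl (fun rp cur => (if rp.1 = cur - rp.2 then 1 else 0, cur)) s

def Bval (k : Nat) : Int :=
  let d := (Ldig k).reverse
  (foldF (d.drop 2) (d.getD 1 0 - d.getD 0 0, d.getD 1 0)).1

lemma fd_cast (k : Nat) : PySem.Int.floordiv (k : Int) 10 = ((k / 10 : Nat) : Int) := by
  exact_mod_cast PySem.Int.floordiv_natCast k 10

lemma md_cast (k : Nat) : PySem.Int.mod (k : Int) 10 = ((k % 10 : Nat) : Int) := by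
  exact_mod_cast PySem.Int.mod_natCast k 10

lemma Ldig_cons (k : Nat) (h : k ≠ 0) : Ldig k = ((k % 10 : Nat) : Int) :: Ldig (k / 10) := by
  simp [Ldig, Nat.digits_def' (by norm_num : 1 < 10) (Nat.pos_of_ne_zero h)]

lemma Ldig_ne_nil (k : Nat) (h : k ≠ 0) : Ldig k ≠ [] := by
  rw [Ldig_cons k h]; simp

lemma digitsRev_eq (f : Nat) : ∀ t : Nat, t < 10 ^ f → digitsRev f (t : Int) = Ldig t := by
  induction f with
  | zero => intro t ht; interval_cases t; rfl
  | succ f ih =>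
    intro t ht
    by_cases h0 : t = 0
    · subst h0; simp [digitsRev, Ldig]
    · have hne : ((t : Int)) ≠ 0 := by exact_mod_cast h0
      have hdiv : t / 10 < 10 ^ f := by
        rw [pow_succ] at ht; omega
      rw [show digitsRev (f + 1) (t : Int)
            = PySem.Int.mod (t : Int) 10 :: digitsRev f (PySem.Int.floordiv (t : Int) 10) from by
          simp [digitsRev, h0]]
      rw [md_cast, fd_cast, ih _ hdiv, ← Ldig_cons t h0]

lemma snd_foldF : ∀ (l : List Int) (r p : Int), (foldF l (r, p)).2 = l.getLastD p := by
  intro l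
  induction l with
  | nil => intro r p; rfl
  | cons c l ih =>
    intro r p
    rw [show foldF (c :: l) (r, p)
          = foldF l (if r = c - p then 1 else 0, c) from rfl, ih,
      List.getLastD_cons]

lemma getLastD_drop2 (e : List Int) (x : Int) (he : e ≠ []) :
    (((e ++ [x]).drop 2).getLastD ((e ++ [x]).getD 1 0)) = x := by
  match e with
  | [] => exact absurd rfl he
  | [a] => simp
  | a :: b :: t => simp

lemma Ldig_len2 (q : Nat) (hq : 10 ≤ q) : 2 ≤ (Ldig q).length := by
  have h1 : (Nat.digits 10 q).length = Nat.log 10 q + 1 :=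
    Nat.length_digits 10 q (by norm_num) (by omega)
  have h2 : 0 < Nat.log 10 q := Nat.log_pos (by norm_num) hq
  simp [Ldig, h1]; omega

lemma Ldig_two (k : Nat) (h1 : 10 ≤ k) (h2 : k < 100) :
    Ldig k = [((k % 10 : Nat) : Int), ((k / 10 : Nat) : Int)] := by
  have hq1 : 1 ≤ k / 10 := by omega
  have hq2 : k / 10 < 10 := by omega
  rw [Ldig_cons k (by omega), Ldig_cons (k / 10) (by omega)]
  rw [Nat.mod_eq_of_lt hq2, Nat.div_eq_of_lt hq2]
  simp [Ldig]

lemma two_digit_case (k g : Nat) (h1 : 10 ≤ k) (h2 : k < 100) (hg : 1 ≤ g) :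
    sequenceA g (k : Int) (PySem.Int.floordiv (k : Int) 10) = Bval k := by
  obtain ⟨g', rfl⟩ : ∃ g', g = g' + 1 := ⟨g - 1, by omega⟩
  have hz : k / 10 / 10 = 0 := by omega
  have hfd2 : PySem.Int.floordiv ((k / 10 : Nat) : Int) 10 = 0 := by
    rw [fd_cast, hz]; rfl
  rw [show sequenceA (g' + 1) (k : Int) (PySem.Int.floordiv (k : Int) 10)
        = (if PySem.Int.floordiv (PySem.Int.floordiv (k : Int) 10) 10 = 0 then
             PySem.Int.mod (k : Int) 10 - PySem.Int.floordiv (k : Int) 10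
           else
             if sequenceA g' (PySem.Int.floordiv (k : Int) 10)
                  (PySem.Int.floordiv (PySem.Int.floordiv (k : Int) 10) 10)
                 = PySem.Int.mod (k : Int) 10 - PySem.Int.mod (PySem.Int.floordiv (k : Int) 10) 10
             then 1 else 0) from rfl]
  rw [fd_cast, md_cast, hfd2, if_pos rfl]
  rw [show Bval k = (foldF (((Ldig k).reverse).drop 2)
        (((Ldig k).reverse).getD 1 0 - ((Ldig k).reverse).getD 0 0,
         ((Ldig k).reverse).getD 1 0)).1 from rfl]
  rw [Ldig_two k h1 h2]
  simp [foldF]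

lemma seq_eq_Bval (f : Nat) : ∀ k g : Nat, 10 ≤ k → k < 10 ^ (f + 2) → f + 1 ≤ g →
    sequenceA g (k : Int) (PySem.Int.floordiv (k : Int) 10) = Bval k := by
  induction f with
  | zero =>
    intro k g h1 h2 hg
    exact two_digit_case k g h1 (by norm_num at h2; omega) hg
  | succ f ih =>
    intro k g h1 h2 hg
    by_cases hsmall : k < 100
    · exact two_digit_case k g h1 hsmall (by omega)
    · -- k ≥ 100: one recursion step on both sides
      obtain ⟨g', rfl⟩ : ∃ g', g = g' + 1 := ⟨g - 1, by omega⟩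
      set q := k / 10 with hqdef
      have hq10 : 10 ≤ q := by omega
      have hq2 : q < 10 ^ (f + 2) := by
        rw [pow_succ] at h2; omega
      have hqne : PySem.Int.floordiv ((q : Nat) : Int) 10 ≠ 0 := by
        rw [fd_cast]
        simp only [ne_eq, Nat.cast_eq_zero]
        omega
      -- A side
      rw [show sequenceA (g' + 1) (k : Int) (PySem.Int.floordiv (k : Int) 10)
            = (if PySem.Int.floordiv (PySem.Int.floordiv (k : Int) 10) 10 = 0 then
                 PySem.Int.mod (k : Int) 10 - PySem.Int.floordiv (k : Int) 10
               else
                 if sequenceA g' (PySem.Int.floordiv (k : Int) 10)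
                      (PySem.Int.floordiv (PySem.Int.floordiv (k : Int) 10) 10)
                     = PySem.Int.mod (k : Int) 10
                       - PySem.Int.mod (PySem.Int.floordiv (k : Int) 10) 10
                 then 1 else 0) from rfl]
      rw [fd_cast k, if_neg hqne, fd_cast q, ← fd_cast q,
        ih q g' hq10 hq2 (by omega), md_cast, md_cast]
      -- B side
      have hLk : Ldig k = ((k % 10 : Nat) : Int) :: Ldig q := Ldig_cons k (by omega)
      have hLq : Ldig q = ((q % 10 : Nat) : Int) :: Ldig (q / 10) := Ldig_cons q (by omega)
      have he2 : 2 ≤ ((Ldig q).reverse).length := by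
        rw [List.length_reverse]; exact Ldig_len2 q hq10
      have hrev : (Ldig k).reverse = (Ldig q).reverse ++ [((k % 10 : Nat) : Int)] := by
        rw [hLk, List.reverse_cons]
      rw [show Bval k = (foldF (((Ldig k).reverse).drop 2)
            (((Ldig k).reverse).getD 1 0 - ((Ldig k).reverse).getD 0 0,
             ((Ldig k).reverse).getD 1 0)).1 from rfl]
      rw [hrev]
      rw [List.drop_append_of_le_length he2]
      rw [List.getD_append _ _ _ 1 (by omega), List.getD_append _ _ _ 0 (by omega)]
      rw [show foldF ((Ldig q).reverse.drop 2 ++ [((k % 10 : Nat) : Int)])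
            (((Ldig q).reverse).getD 1 0 - ((Ldig q).reverse).getD 0 0,
             ((Ldig q).reverse).getD 1 0)
            = (let s := foldF ((Ldig q).reverse.drop 2)
                 (((Ldig q).reverse).getD 1 0 - ((Ldig q).reverse).getD 0 0,
                  ((Ldig q).reverse).getD 1 0)
               (if s.1 = ((k % 10 : Nat) : Int) - s.2 then 1 else 0,
                ((k % 10 : Nat) : Int))) from by
          simp [foldF, List.foldl_append]]
      have hfst : (foldF ((Ldig q).reverse.drop 2)
            (((Ldig q).reverse).getD 1 0 - ((Ldig q).reverse).getD 0 0,
             ((Ldig q).reverse).getD 1 0)).1 = Bval q := rfl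
      have hsnd : (foldF ((Ldig q).reverse.drop 2)
            (((Ldig q).reverse).getD 1 0 - ((Ldig q).reverse).getD 0 0,
             ((Ldig q).reverse).getD 1 0)).2 = ((q % 10 : Nat) : Int) := by
        rw [show (foldF ((Ldig q).reverse.drop 2)
              (((Ldig q).reverse).getD 1 0 - ((Ldig q).reverse).getD 0 0,
               ((Ldig q).reverse).getD 1 0)).2
              = ((Ldig q).reverse.drop 2).getLastD (((Ldig q).reverse).getD 1 0) from
            snd_foldF _ _ _]
        have hrevq : (Ldig q).reverse = (Ldig (q / 10)).reverse ++ [((q % 10 : Nat) : Int)] := by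
          rw [hLq, List.reverse_cons]
        rw [hrevq]
        exact getLastD_drop2 _ _ (by
          simp only [ne_eq, List.reverse_eq_nil_iff]
          exact Ldig_ne_nil (q / 10) (by omega))
      simp only [hfst, hsnd]
      rw [hqdef]

lemma body_eq (i : Int) (h1 : 100 ≤ i) (h2 : i ≤ 2147483648) :
    sequenceA 64 i (PySem.Int.floordiv i 10) =
      (let d := (digitsRev 64 i).reverse
       let rp := (d.drop 2).foldl
          (fun (rp : Int × Int) cur => (if rp.1 = cur - rp.2 then 1 else 0, cur))
          (d.getD 1 0 - d.getD 0 0, d.getD 1 0)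
       rp.1) := by
  obtain ⟨k, rfl⟩ : ∃ k : Nat, i = (k : Int) := ⟨i.toNat, by omega⟩
  have hk1 : 10 ≤ k := by exact_mod_cast by omega
  have hk2 : k < 10 ^ 64 := by
    have : (k : Int) < 10 ^ 64 := by
      calc (k : Int) ≤ 2147483648 := h2
        _ < 10 ^ 64 := by norm_num
    exact_mod_cast this
  have hk3 : k < 10 ^ (62 + 2) := hk2
  rw [digitsRev_eq 64 k hk2]
  exact seq_eq_Bval 62 k 64 hk1 hk3 (by omega)

-- ===== VERDICT (by name: the statement is the Claim_ definition above) =====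
lemma foldl_shift (l : List Int) (g : Int → Int) (c : Int) :
    List.foldl (fun acc x => acc + g x) 0 l + c = List.foldl (fun acc x => acc + g x) c l := by
  rw [PySem.List.foldl_add, PySem.List.foldl_add]
  omega

theorem check_spec : Claim_equal_check := by
  intro n hdom
  have hbound : n ≤ 2147483648 := by
    unfold Dom_check pvDomInt at hdom
    simpa using (of_decide_eq_true hdom).2
  unfold Spec_check check check_alt
  by_cases hlt : n < 100
  · simp [hlt]
  · simp only [if_neg hlt]
    set n' := if n = 1000 then n - 1 else n with hn'
    have hn'le : n' ≤ 2147483648 := by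
      rw [hn']; split <;> omega
    have hpt : ∀ (acc : Int), ∀ x ∈ PySem.List.pyRange 100 (n' + 1) 1,
        acc + sequenceA 64 x (PySem.Int.floordiv x 10)
          = acc + (let d := (digitsRev 64 x).reverse
                   let rp := (d.drop 2).foldl
                      (fun (rp : Int × Int) cur => (if rp.1 = cur - rp.2 then 1 else 0, cur))
                      (d.getD 1 0 - d.getD 0 0, d.getD 1 0)
                   rp.1) := by
      intro acc x hx
      have hmem := PySem.List.mem_pyRange_one.mp hx
      exact congrArg (acc + ·) (body_eq x hmem.1 (by omega))
    exact Eq.trans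
      (congrArg (· + 99)
        (PySem.List.foldl_congr_mem (PySem.List.pyRange 100 (n' + 1) 1)
          (fun cnt i => cnt + sequenceA 64 i (PySem.Int.floordiv i 10))
          (fun cnt i => cnt
            + (let d := (digitsRev 64 i).reverse
               let rp := (d.drop 2).foldl
                  (fun (rp : Int × Int) cur => (if rp.1 = cur - rp.2 then 1 else 0, cur))
                  (d.getD 1 0 - d.getD 0 0, d.getD 1 0)
               rp.1)) 0 hpt))
      (foldl_shift (PySem.List.pyRange 100 (n' + 1) 1)
        (fun i => (let d := (digitsRev 64 i).reverse
                   let rp := (d.drop 2).foldl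
                      (fun (rp : Int × Int) cur => (if rp.1 = cur - rp.2 then 1 else 0, cur))
                      (d.getD 1 0 - d.getD 0 0, d.getD 1 0)
                   rp.1)) 99)
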